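-- pv_equiv track=rewrite | github.com/Smells-tech/real-time-OCR | error_correction.py | join_with_newlines
-- ===== SOURCE A (Python) =====
-- def join_with_newlines(words: list[str]) -> str:
--     if not words:
--         return ''
--
--     result = [words[0]]
--     for prev, curr in zip(words, words[1:]):
--         if prev == '\n' or curr == '\n':
--             # No space around newlines
--             result.append(curr)
--         else:
--             # Add space between words
--             result.append(' ' + curr)
--     return ''.join(result)
-- ===== SOURCE B (Python) =====
-- def join_with_newlines(words: list[str]) -> str:
--     segments = []
--     current = []
--     for word in words:
--         if word == '\n':
--             segments.append(' '.join(current))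
--             current = []
--         else:
--             current.append(word)
--     segments.append(' '.join(current))
--     return '\n'.join(segments)
-- ===== Notes on version B (the rewrite author's own statement) =====
-- stated objective: simpler
-- what changed: Replaced the pairwise zip scan deciding a space before each word with a group-then-join decomposition: split the word list into segments at '\n' tokens, ' '.join each segment, '\n'.join the segments.
import Mathlib
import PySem

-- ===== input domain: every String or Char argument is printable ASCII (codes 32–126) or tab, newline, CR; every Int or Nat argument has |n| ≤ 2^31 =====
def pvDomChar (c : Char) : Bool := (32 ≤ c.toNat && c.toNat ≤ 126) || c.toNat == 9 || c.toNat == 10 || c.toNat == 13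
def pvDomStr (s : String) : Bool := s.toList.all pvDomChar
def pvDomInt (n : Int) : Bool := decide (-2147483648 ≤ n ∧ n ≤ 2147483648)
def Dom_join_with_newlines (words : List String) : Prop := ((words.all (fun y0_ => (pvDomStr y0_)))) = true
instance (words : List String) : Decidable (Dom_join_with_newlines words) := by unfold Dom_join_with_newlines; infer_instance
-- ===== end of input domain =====

-- B replaces A's pairwise space-decision scan with a group-at-'\n'-then-join decomposition (objective: simpler).


-- ===== PORT A =====
def join_with_newlines (words : List String) : String :=
  match words with
  | [] => ""
  | w :: ws =>
    let result : List String :=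
      (List.zip (w :: ws) ws).foldl
        (fun res pc =>
          if pc.1 = "\n" ∨ pc.2 = "\n" then res ++ [pc.2]
          else res ++ [" " ++ pc.2]) [w]
    PySem.Str.join "" result

-- ===== PORT B =====
def join_with_newlines_alt (words : List String) : String :=
  let st : List String × List String :=
    words.foldl
      (fun st word =>
        if word = "\n" then (st.1 ++ [PySem.Str.join " " st.2], [])
        else (st.1, st.2 ++ [word])) ([], [])
  PySem.Str.join "\n" (st.1 ++ [PySem.Str.join " " st.2])

-- ===== PRECONDITION & SPEC =====
def Spec_join_with_newlines (words : List String) (out : String) : Prop := out = join_with_newlines_alt words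
instance (words : List String) (out : String) : Decidable (Spec_join_with_newlines words out) := by unfold Spec_join_with_newlines; infer_instance

-- ===== CLAIM (what is proved, stated in full; the proofs are below) =====
def Claim_equal_join_with_newlines : Prop := ∀ (words : List String), Dom_join_with_newlines words → Spec_join_with_newlines words (join_with_newlines words)

-- ===== LEMMAS AND PROOFS =====

-- join sep (x :: l) for nonempty l
theorem cj_cons (sep x : List Char) (l : List (List Char)) (h : l ≠ []) :
    PySem.Chars.join sep (x :: l) = x ++ sep ++ PySem.Chars.join sep l := by
  cases l with
  | nil => exact absurd rfl h
  | cons q t => exact PySem.Chars.join_cons_cons sep x q t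

theorem cj_append_last (sep : List Char) (l : List (List Char)) (y : List Char) (h : l ≠ []) :
    PySem.Chars.join sep (l ++ [y]) = PySem.Chars.join sep l ++ sep ++ y := by
  induction l with
  | nil => exact absurd rfl h
  | cons a t ih =>
    cases t with
    | nil =>
      simp [PySem.Chars.join_cons_cons, PySem.Chars.join_singleton]
    | cons b t' =>
      have h2 : (a :: b :: t') ++ [y] = a :: ((b :: t') ++ [y]) := by simp
      rw [h2, cj_cons sep a ((b :: t') ++ [y]) (by simp), ih (by simp),
        cj_cons sep a (b :: t') (by simp)]
      simp

theorem cj_nil_append (l : List (List Char)) (y : List Char) :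
    PySem.Chars.join [] (l ++ [y]) = PySem.Chars.join [] l ++ y := by
  cases l with
  | nil => simp [PySem.Chars.join_nil, PySem.Chars.join_singleton]
  | cons a t =>
    rw [cj_append_last [] (a :: t) y (by simp)]
    simp

theorem cj_merge (sep : List Char) (xs : List (List Char)) (a b : List Char) :
    PySem.Chars.join sep (xs ++ [a, b]) = PySem.Chars.join sep (xs ++ [a ++ sep ++ b]) := by
  induction xs with
  | nil =>
    simp [PySem.Chars.join_cons_cons, PySem.Chars.join_singleton]
  | cons x t ih =>
    rw [List.cons_append, List.cons_append,
      cj_cons sep x (t ++ [a, b]) (by simp),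
      cj_cons sep x (t ++ [a ++ sep ++ b]) (by simp), ih]

-- String-level consequences
theorem sj_empty_append (xs : List String) (y : String) :
    PySem.Str.join "" (xs ++ [y]) = PySem.Str.join "" xs ++ y := by
  apply String.toList_inj.mp
  simp [PySem.Str.toList_join, cj_nil_append]

theorem sj_append_last (sep : String) (xs : List String) (y : String) (h : xs ≠ []) :
    PySem.Str.join sep (xs ++ [y]) = PySem.Str.join sep xs ++ sep ++ y := by
  apply String.toList_inj.mp
  simp [PySem.Str.toList_join, cj_append_last sep.toList (xs.map String.toList) y.toList (by simpa)]

theorem sj_merge (sep : String) (xs : List String) (a b : String) :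
    PySem.Str.join sep (xs ++ [a, b]) = PySem.Str.join sep (xs ++ [a ++ sep ++ b]) := by
  apply String.toList_inj.mp
  simp only [PySem.Str.toList_join, List.map_append, List.map_cons, List.map_nil,
    String.toList_append]
  exact cj_merge sep.toList (xs.map String.toList) a.toList b.toList

theorem sj_singleton (sep y : String) : PySem.Str.join sep [y] = y := by
  apply String.toList_inj.mp
  simp [PySem.Str.toList_join, PySem.Chars.join_singleton]

theorem sj_nil (sep : String) : PySem.Str.join sep [] = "" := by
  apply String.toList_inj.mp
  simp [PySem.Str.toList_join, PySem.Chars.join_nil]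

-- common recursive form: gA afterNL ws = the rest of A's output after a word, afterNL = (prev = "\n")
def gA : Bool → List String → String
  | _, [] => ""
  | b, c :: cs => (if b = true ∨ c = "\n" then c else " " ++ c) ++ gA (decide (c = "\n")) cs

-- direct recursion equivalent of B's loop state: kB cur ws
def kB : List String → List String → String
  | cur, [] => PySem.Str.join " " cur
  | cur, w :: ws =>
    if w = "\n" then PySem.Str.join " " cur ++ "\n" ++ kB [] ws
    else kB (cur ++ [w]) ws

theorem A_loop (ws : List String) : ∀ (p : String) (acc : List String),
    PySem.Str.join ""
      ((List.zip (p :: ws) ws).foldl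
        (fun res pc =>
          if pc.1 = "\n" ∨ pc.2 = "\n" then res ++ [pc.2]
          else res ++ [" " ++ pc.2]) acc)
      = PySem.Str.join "" acc ++ gA (decide (p = "\n")) ws := by
  induction ws with
  | nil => intro p acc; simp [gA]
  | cons c cs ih =>
    intro p acc
    show PySem.Str.join ""
        ((List.zip (c :: cs) cs).foldl _
          (if p = "\n" ∨ c = "\n" then acc ++ [c] else acc ++ [" " ++ c])) = _
    rw [ih c]
    by_cases hp : p = "\n" <;> by_cases hc : c = "\n" <;>
      simp [hp, hc, gA, sj_empty_append, String.append_assoc]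

theorem B_loop (ws : List String) : ∀ (segs cur : List String),
    PySem.Str.join "\n"
      ((ws.foldl
        (fun st word =>
          if word = "\n" then (st.1 ++ [PySem.Str.join " " st.2], [])
          else (st.1, st.2 ++ [word])) (segs, cur)).1
       ++ [PySem.Str.join " "
            ((ws.foldl
              (fun st word =>
                if word = "\n" then (st.1 ++ [PySem.Str.join " " st.2], [])
                else (st.1, st.2 ++ [word])) (segs, cur)).2)])
      = PySem.Str.join "\n" (segs ++ [kB cur ws]) := by
  induction ws with
  | nil => intro segs cur; rfl
  | cons w ws' ih =>
    intro segs cur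
    simp only [List.foldl_cons]
    by_cases hw : w = "\n"
    · rw [if_pos hw, ih (segs ++ [PySem.Str.join " " cur]) [], List.append_assoc]
      show PySem.Str.join "\n" (segs ++ [PySem.Str.join " " cur, kB [] ws']) = _
      rw [sj_merge]
      simp [kB, hw, String.append_assoc]
    · rw [if_neg hw, ih segs (cur ++ [w])]
      simp [kB, hw]

theorem kB_gA (ws : List String) :
    kB [] ws = gA true ws ∧ ∀ cur : List String, cur ≠ [] →
      kB cur ws = PySem.Str.join " " cur ++ gA false ws := by
  induction ws with
  | nil =>
    refine ⟨by simp [kB, gA, sj_nil], fun cur h => by simp [kB, gA]⟩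
  | cons w ws' ih =>
    obtain ⟨ih1, ih2⟩ := ih
    constructor
    · by_cases hw : w = "\n"
      · simp [kB, hw, gA, ih1, sj_nil]
      · have := ih2 [w] (by simp)
        simp [kB, hw, gA, this, sj_singleton]
    · intro cur hcur
      by_cases hw : w = "\n"
      · simp [kB, hw, gA, ih1, String.append_assoc]
      · have h1 := ih2 (cur ++ [w]) (by simp)
        have h2 : PySem.Str.join " " (cur ++ [w]) = PySem.Str.join " " cur ++ " " ++ w :=
          sj_append_last " " cur w hcur
        simp [kB, hw, gA, h1, h2, String.append_assoc]

-- ===== VERDICT (by name: the statement is the Claim_ definition above) =====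
theorem join_with_newlines_spec : Claim_equal_join_with_newlines := by
  intro words _
  show join_with_newlines words = join_with_newlines_alt words
  cases words with
  | nil =>
    show "" = PySem.Str.join "\n" ([] ++ [PySem.Str.join " " []])
    rw [sj_nil, List.nil_append, sj_singleton]
  | cons w ws =>
    show PySem.Str.join "" _ = PySem.Str.join "\n" _
    rw [A_loop ws w [w], B_loop (w :: ws) [] [], List.nil_append, sj_singleton, sj_singleton]
    by_cases hw : w = "\n"
    · simp [kB, hw, (kB_gA ws).1, sj_nil]
    · have := (kB_gA ws).2 [w] (by simp)
      simp [kB, hw, this, sj_singleton]
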